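-- pv_equiv track=rewrite | github.com/xiscoding/reverse-engineering | code/python/conversions_keygen.py | find_valid_byte
-- ===== SOURCE A (Python) =====
-- def find_valid_byte(dword):
--     """Finds a 4-byte hex with the same digit sum as the input within given bounds.
--     Args:
--         dword: The input 4-byte hex string.
--     Returns:
--         A new 4-byte hex string with the same digit sum, within bounds.
--     """
--     # Convert hex string to list of integers (hex digits)
--     hex_digits = [int(char, 16) for char in dword]
--     # Calculate the sum of the hex digits
--     digit_sum = sum(hex_digits)
--     # Find a valid pair of digits within bounds that sum to the same value
--     for i in range(0x20, 0x7F):  # Use 0x7F instead of 0x7E + 0x1 for inclusive range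
--       for j in range(0x20, 0x7F):
--         if i + j == digit_sum:
--           new_hex = f"{i:02X}{j:02X}"  # Format into 4-byte hex string
--           return new_hex
--     # If no valid pair is found, return the original value
--     return dword
-- ===== SOURCE B (Python) =====
-- def find_valid_byte(dword):
--     """Finds a 4-byte hex with the same digit sum as the input within given bounds."""
--     digit_sum = sum(int(char, 16) for char in dword)
--     # Solve i + j == digit_sum in closed form: the loop's first match has the
--     # smallest feasible i, i.e. i = max(0x20, digit_sum - 0x7E).
--     i = max(0x20, digit_sum - 0x7E)
--     j = digit_sum - i
--     if i <= 0x7E and 0x20 <= j <= 0x7E: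
--         return f"{i:02X}{j:02X}"
--     return dword
-- ===== Notes on version B (the rewrite author's own statement) =====
-- stated objective: simpler
-- what changed: Replaces the 95x95 nested scan for a pair (i,j) in [0x20,0x7E] with i+j = digit_sum by the closed-form first match i = max(0x20, digit_sum - 0x7E), j = digit_sum - i, guarded by the feasibility bounds.
import Mathlib
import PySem

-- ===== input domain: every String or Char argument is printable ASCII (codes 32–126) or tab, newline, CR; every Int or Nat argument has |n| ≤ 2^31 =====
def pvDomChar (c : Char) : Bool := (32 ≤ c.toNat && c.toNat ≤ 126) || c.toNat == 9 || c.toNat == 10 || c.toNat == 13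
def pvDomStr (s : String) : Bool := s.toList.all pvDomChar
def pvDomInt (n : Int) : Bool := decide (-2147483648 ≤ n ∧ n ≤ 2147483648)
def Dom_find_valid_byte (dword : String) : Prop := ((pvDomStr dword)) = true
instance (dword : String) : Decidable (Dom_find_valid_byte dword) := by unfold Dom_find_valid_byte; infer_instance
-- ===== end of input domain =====

-- B replaces A's 95×95 nested scan by the closed-form first match i = max(0x20, digit_sum-0x7E); objective: simpler.

-- ===== PORT A =====
-- int(char, 16) for a single char; Pre_ excludes chars where Python raises ValueError (there it defaults to 0)
def hexVal (c : Char) : Int := (PySem.Int.ofCharsBase? [c] 16).getD 0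

-- f"{i:02X}" — exact for 0 ≤ i < 256, which covers every i, j ∈ [0x20, 0x7E] used here
def hexUpChar (n : Nat) : Char := if n < 10 then Char.ofNat (48 + n) else Char.ofNat (55 + n)
def fmtHex2 (i : Int) : List Char := [hexUpChar (i.toNat / 16 % 16), hexUpChar (i.toNat % 16)]

def find_valid_byte (dword : String) : String :=
  let hex_digits := dword.toList.map hexVal
  let digit_sum := hex_digits.sum
  match (PySem.List.pyRange 32 127 1).findSome? (fun i =>
          (PySem.List.pyRange 32 127 1).findSome? (fun j =>
            if i + j = digit_sum then some (String.mk (fmtHex2 i ++ fmtHex2 j)) else none)) with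
  | some s => s
  | none => dword

-- ===== PORT B =====
def find_valid_byte_alt (dword : String) : String :=
  let digit_sum := (dword.toList.map hexVal).sum
  let i := max 32 (digit_sum - 126)
  let j := digit_sum - i
  if i ≤ 126 ∧ 32 ≤ j ∧ j ≤ 126 then String.mk (fmtHex2 i ++ fmtHex2 j) else dword

-- ===== PRECONDITION & SPEC =====
-- Pre_ excludes exactly the strings containing a non-hex-digit character, on which A's int(char, 16) raises ValueError.
def Pre_find_valid_byte (dword : String) : Prop :=
  dword.toList.all (fun c => ('0' ≤ c && c ≤ '9') || ('a' ≤ c && c ≤ 'f') || ('A' ≤ c && c ≤ 'F')) = true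
instance (dword : String) : Decidable (Pre_find_valid_byte dword) := by unfold Pre_find_valid_byte; infer_instance

def pvWitness_find_valid_byte : String := "1A"

def Spec_find_valid_byte (dword : String) (out : String) : Prop := out = find_valid_byte_alt dword
instance (dword : String) (out : String) : Decidable (Spec_find_valid_byte dword out) := by unfold Spec_find_valid_byte; infer_instance

-- ===== CLAIM (what is proved, stated in full; the proofs are below) =====
def Claim_equal_find_valid_byte : Prop := ∀ (dword : String), Dom_find_valid_byte dword → Pre_find_valid_byte dword → Spec_find_valid_byte dword (find_valid_byte dword)

-- ===== LEMMAS AND PROOFS =====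

-- inner loop: the first j ∈ [a, a+n) with i + j = s is s - i itself, if it lies in the range
theorem inner_loop {α : Type} (f : Int → Int → α) (s i a : Int) (n : Nat) :
    (PySem.List.pyRange a (a + n) 1).findSome?
        (fun j => if i + j = s then some (f i j) else none)
      = if a ≤ s - i ∧ s - i < a + n then some (f i (s - i)) else none := by
  induction n generalizing a with
  | zero =>
    rw [PySem.List.pyRange_one_eq_nil (by omega)]
    simp only [List.findSome?_nil]
    rw [if_neg (by push_cast; omega)]
  | succ n ih =>
    rw [PySem.List.pyRange_one_cons (by push_cast; omega)]
    rw [List.findSome?_cons]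
    by_cases h : i + a = s
    · rw [if_pos h]
      rw [if_pos (by push_cast; omega)]
      have : s - i = a := by omega
      rw [this]
    · rw [if_neg h]
      have : a + ((n + 1 : Nat) : Int) = (a + 1) + (n : Nat) := by push_cast; omega
      rw [this, ih (a + 1)]
      by_cases h2 : a + 1 ≤ s - i ∧ s - i < a + 1 + n
      · rw [if_pos h2, if_pos (by push_cast; omega)]
      · rw [if_neg h2, if_neg (by push_cast; omega)]

-- outer loop: the first i ∈ [a, a+n) admitting some j is max a (s - 126)
theorem outer_loop {α : Type} (f : Int → Int → α) (s a : Int) (n : Nat) :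
    (PySem.List.pyRange a (a + n) 1).findSome?
        (fun i => if 32 ≤ s - i ∧ s - i < 127 then some (f i (s - i)) else none)
      = if max a (s - 126) < a + n ∧ max a (s - 126) + 32 ≤ s then
          some (f (max a (s - 126)) (s - max a (s - 126))) else none := by
  induction n generalizing a with
  | zero =>
    rw [PySem.List.pyRange_one_eq_nil (by omega)]
    simp only [List.findSome?_nil]
    rw [if_neg (by push_cast; omega)]
  | succ n ih =>
    rw [PySem.List.pyRange_one_cons (by push_cast; omega)]
    rw [List.findSome?_cons]
    by_cases h : 32 ≤ s - a ∧ s - a < 127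
    · rw [if_pos h]
      have hm : max a (s - 126) = a := by omega
      rw [if_pos (by rw [hm]; push_cast; omega), hm]
    · rw [if_neg h]
      have : a + ((n + 1 : Nat) : Int) = (a + 1) + (n : Nat) := by push_cast; omega
      rw [this, ih (a + 1)]
      by_cases hc : max (a + 1) (s - 126) < a + 1 + n ∧ max (a + 1) (s - 126) + 32 ≤ s
      · have hm : max (a + 1) (s - 126) = max a (s - 126) := by omega
        rw [if_pos hc, hm] at *
        rw [if_pos (by push_cast at hc ⊢; omega)]
      · rw [if_neg hc, if_neg (by push_cast at hc ⊢; omega)]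

theorem loops_eq (s : Int) :
    (PySem.List.pyRange 32 127 1).findSome?
        (fun i => (PySem.List.pyRange 32 127 1).findSome?
          (fun j => if i + j = s then some (String.mk (fmtHex2 i ++ fmtHex2 j)) else none))
      = if max 32 (s - 126) ≤ 126 ∧ 32 ≤ s - max 32 (s - 126) ∧ s - max 32 (s - 126) ≤ 126 then
          some (String.mk (fmtHex2 (max 32 (s - 126)) ++ fmtHex2 (s - max 32 (s - 126)))) else none := by
  have h127 : PySem.List.pyRange 32 127 1 = PySem.List.pyRange 32 (32 + ((95 : Nat) : Int)) 1 := by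
    norm_num
  rw [h127]
  have hin : ∀ i : Int,
      (PySem.List.pyRange 32 (32 + ((95 : Nat) : Int)) 1).findSome?
        (fun j => if i + j = s then some (String.mk (fmtHex2 i ++ fmtHex2 j)) else none)
      = if 32 ≤ s - i ∧ s - i < 127 then some (String.mk (fmtHex2 i ++ fmtHex2 (s - i))) else none := by
    intro i
    rw [inner_loop (fun i j => String.mk (fmtHex2 i ++ fmtHex2 j)) s i 32 95,
        show (32 : Int) + ((95 : Nat) : Int) = 127 by norm_num]
  simp only [hin]
  rw [outer_loop (fun i j => String.mk (fmtHex2 i ++ fmtHex2 j)) s 32 95]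
  split_ifs with h1 h2 h2
  · rfl
  · exfalso; push_cast at h1; omega
  · exfalso; push_cast at h1; omega
  · rfl

theorem closed_form (dword : String) : find_valid_byte dword = find_valid_byte_alt dword := by
  simp only [find_valid_byte, find_valid_byte_alt]
  rw [loops_eq]
  split_ifs with h
  · rfl
  · rfl

-- ===== VERDICT (by name: the statement is the Claim_ definition above) =====
theorem find_valid_byte_spec : Claim_equal_find_valid_byte := by
  intro dword _ _
  unfold Spec_find_valid_byte
  exact closed_form dword
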